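-- pv_equiv track=rewrite | github.com/rber474/padelranking.website | paddelranking/website/utils.py | fixtures
-- ===== SOURCE A (Python) =====
-- from collections import deque
-- from itertools import islice
--
-- def fixtures(teams):
--
--     if len(teams) % 2:
--         teams.append("Bye")
--
--     ln = len(teams) // 2
--     dq1, dq2 = deque(islice(teams, None, ln)), deque(islice(teams, ln, None))
--     for _ in range(len(teams)-1):
--         yield list(zip(dq1, dq2)) # list(zip.. python3
--         #  pop off first deque's left element to
--         # "fix one of the competitors in the first column"
--         start = dq1.popleft()
--         # rotate the others clockwise one position
--         # by swapping elements
--         dq1.appendleft(dq2.popleft())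
--         dq2.append(dq1.pop())
--         # reattach first competitor
--         dq1.appendleft(start)
-- ===== SOURCE B (Python) =====
-- def fixtures(teams):
--     # Generator; mutates `teams` (appends "Bye") exactly like the original.
--     if len(teams) % 2:
--         teams.append("Bye")
--     if not teams:
--         return
--     ln = len(teams) // 2
--     f = teams[0]
--     # invariant ring of the non-fixed teams, built once
--     ring = teams[1:ln] + teams[ln:][::-1]
--     L = len(ring)
--     for r in range(len(teams) - 1):
--         R = ring[L - r:] + ring[:L - r]      # ring rotated right by r
--         dq1 = [f] + R[:ln - 1]
--         dq2 = R[ln - 1:][::-1]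
--         yield list(zip(dq1, dq2))
-- ===== Notes on version B (the rewrite author's own statement) =====
-- stated objective: alternative
-- what changed: Each round is recomputed independently from the round index by rotating a fixed ring of the non-fixed teams (slice arithmetic), instead of incrementally splicing two deques across iterations.
import Mathlib
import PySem

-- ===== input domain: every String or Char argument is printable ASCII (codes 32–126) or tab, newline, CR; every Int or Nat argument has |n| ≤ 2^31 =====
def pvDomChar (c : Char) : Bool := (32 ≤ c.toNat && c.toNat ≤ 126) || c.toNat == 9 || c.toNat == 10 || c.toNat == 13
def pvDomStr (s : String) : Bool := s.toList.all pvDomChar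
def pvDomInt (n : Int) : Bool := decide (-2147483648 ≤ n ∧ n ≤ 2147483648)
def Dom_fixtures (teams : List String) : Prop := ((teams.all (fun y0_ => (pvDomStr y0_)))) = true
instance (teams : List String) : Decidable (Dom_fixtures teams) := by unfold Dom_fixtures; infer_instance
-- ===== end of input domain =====

-- B recomputes each round independently by rotating a fixed ring (index arithmetic) instead of
-- splicing two deques incrementally; equivalence is about the returned rounds (both Pythons also
-- append "Bye" to `teams` in place when its length is odd).

-- ===== PORT A =====
-- the loop body: yield zip(dq1,dq2), then the deque splice; the fallthrough branch is unreachable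
-- (both deques stay nonempty whenever the loop runs)
def fixturesLoopA : Nat → List String → List String → List (List (String × String))
  | 0, _, _ => []
  | n+1, dq1, dq2 =>
    match dq1, dq2 with
    | s :: rest1, y :: rest2 =>
        let d1 := y :: rest1
        (dq1.zip dq2) :: fixturesLoopA n (s :: d1.dropLast) (rest2 ++ [d1.getLast (by simp)])
    | _, _ => [dq1.zip dq2]

def fixtures (teams : List String) : List (List (String × String)) :=
  let t := if teams.length % 2 = 1 then teams ++ ["Bye"] else teams
  let ln := t.length / 2
  fixturesLoopA (t.length - 1) (t.take ln) (t.drop ln)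

-- ===== PORT B =====
def fixtures_alt (teams : List String) : List (List (String × String)) :=
  let t := if teams.length % 2 = 1 then teams ++ ["Bye"] else teams
  if t.isEmpty then [] else
  let ln := t.length / 2
  let f := t.headI
  let ring := (t.take ln).drop 1 ++ (t.drop ln).reverse
  let L := ring.length
  (List.range (t.length - 1)).map (fun r =>
    let R := ring.drop (L - r) ++ ring.take (L - r)
    (f :: R.take (ln - 1)).zip ((R.drop (ln - 1)).reverse))

-- ===== PRECONDITION & SPEC =====
def Spec_fixtures (teams : List String) (out : List (List (String × String))) : Prop := out = fixtures_alt teams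
instance (teams : List String) (out : List (List (String × String))) : Decidable (Spec_fixtures teams out) := by unfold Spec_fixtures; infer_instance

-- ===== CLAIM (what is proved, stated in full; the proofs are below) =====
def Claim_equal_fixtures : Prop := ∀ (teams : List String), Dom_fixtures teams → Spec_fixtures teams (fixtures teams)

-- ===== LEMMAS AND PROOFS =====

-- ring rotated right by k
def pvRotr (R : List String) (k : Nat) : List String :=
  R.drop (R.length - k) ++ R.take (R.length - k)

def pvRnd (f : String) (ln : Nat) (Q : List String) : List (String × String) :=
  (f :: Q.take (ln - 1)).zip ((Q.drop (ln - 1)).reverse)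

lemma pvRotr_zero (R : List String) : pvRotr R 0 = R := by
  simp [pvRotr]

lemma pvRotr_length (R : List String) (k : Nat) : (pvRotr R k).length = R.length := by
  simp [pvRotr]

lemma pvRotr_succ (R : List String) (k : Nat) (hk : k < R.length) (h2 : pvRotr R k ≠ []) :
    pvRotr R (k+1) = (pvRotr R k).getLast h2 :: (pvRotr R k).dropLast := by
  unfold pvRotr at *
  have hm : 1 ≤ R.length - k := by omega
  have h1 : R.take (R.length - k) ≠ [] := by
    rw [Ne, List.take_eq_nil_iff]
    push Not
    constructor
    · omega
    · intro hc; subst hc; simp at hk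
  rw [List.getLast_append_of_right_ne_nil _ _ h1]
  rw [List.dropLast_append_of_ne_nil h1]
  rw [List.getLast_eq_getElem, List.dropLast_eq_take, List.take_take]
  simp only [List.length_take, List.getElem_take]
  have e1 : min (R.length - k) R.length = R.length - k := by omega
  simp only [e1]
  have e2 : R.length - (k+1) = (R.length - k) - 1 := by omega
  rw [e2, List.drop_eq_getElem_cons (by omega)]
  have e3 : R.length - k - 1 + 1 = R.length - k := by omega
  rw [e3]
  have e4 : min (R.length - k - 1) (R.length - k) = R.length - k - 1 := by omega
  rw [e4]
  simp

lemma loopA_inv (ln : Nat) (hln : 1 ≤ ln) (f : String) (R : List String)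
    (hR : R.length = 2*ln - 1) :
    ∀ n k, k + n ≤ R.length →
    fixturesLoopA n (f :: (pvRotr R k).take (ln-1)) (((pvRotr R k).drop (ln-1)).reverse)
      = (List.range n).map (fun i => pvRnd f ln (pvRotr R (k+i))) := by
  intro n
  induction n with
  | zero => intro k hk; simp [fixturesLoopA]
  | succ n ih =>
    intro k hk
    have hQlen : (pvRotr R k).length = 2*ln - 1 := by rw [pvRotr_length, hR]
    set Q := pvRotr R k with hQ
    have halen : (Q.take (ln-1)).length = ln - 1 := by
      rw [List.length_take]; omega
    have hdne : Q.drop (ln-1) ≠ [] := by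
      intro hc
      have := congrArg List.length hc
      simp at this; omega
    have hrne : (Q.drop (ln-1)).reverse ≠ [] := by simpa using hdne
    obtain ⟨y, rest2, h⟩ := List.exists_cons_of_ne_nil hrne
    have hdrop : Q.drop (ln-1) = rest2.reverse ++ [y] := by
      have := congrArg List.reverse h
      simpa using this
    have hQdec : Q = (Q.take (ln-1) ++ rest2.reverse) ++ [y] := by
      conv_lhs => rw [← List.take_append_drop (ln-1) Q]
      rw [hdrop, List.append_assoc]
    have hQne : Q ≠ [] := by intro hc; rw [hc] at hQlen; simp at hQlen; omega
    have hglast : Q.getLast hQne = y := by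
      rw [← List.getLast_drop (i := ln-1) hdne]
      simp only [hdrop, List.getLast_append_singleton]
    have hdlast : Q.dropLast = Q.take (ln-1) ++ rest2.reverse := by
      conv_lhs => rw [hQdec]
      simp
    have hsucc : pvRotr R (k+1) = (y :: Q.take (ln-1)) ++ rest2.reverse := by
      rw [pvRotr_succ R k (by omega) (hQ ▸ hQne), hglast, hdlast]
      simp
    have hylen : (y :: Q.take (ln-1)).length = ln := by simp [halen]; omega
    have hS1 : (y :: Q.take (ln-1)).dropLast = (pvRotr R (k+1)).take (ln-1) := by
      rw [hsucc, List.take_append_of_le_length (by omega), List.dropLast_eq_take, hylen]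
    have hS2 : rest2 ++ [(y :: Q.take (ln-1)).getLast (by simp)]
        = ((pvRotr R (k+1)).drop (ln-1)).reverse := by
      rw [hsucc, List.drop_append_of_le_length (by omega)]
      have : (y :: Q.take (ln-1)).drop (ln-1) = [(y :: Q.take (ln-1)).getLast (by simp)] := by
        rw [List.drop_eq_getElem_cons (by omega), List.getLast_eq_getElem]
        simp [hylen]
      rw [this]
      simp
    rw [h]
    show ((f :: Q.take (ln-1)).zip (y :: rest2)) ::
        fixturesLoopA n (f :: (y :: Q.take (ln-1)).dropLast)
          (rest2 ++ [(y :: Q.take (ln-1)).getLast (by simp)])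
      = _
    rw [hS1, hS2, ih (k+1) (by omega)]
    rw [List.range_succ_eq_map, List.map_cons, List.map_map]
    congr 1
    · simp only [pvRnd, Nat.add_zero, ← hQ, h]
    · apply List.map_congr_left
      intro i _
      simp only [Function.comp_apply]
      have e : k + (i+1) = k+1+i := by omega
      rw [e]

-- ===== VERDICT (by name: the statement is the Claim_ definition above) =====
theorem fixtures_spec : Claim_equal_fixtures := by
  intro teams _
  show fixtures teams = fixtures_alt teams
  have hev : (if teams.length % 2 = 1 then teams ++ ["Bye"] else teams).length % 2 = 0 := by
    split
    · simp; omega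
    · omega
  simp only [fixtures, fixtures_alt]
  generalize hgen : (if teams.length % 2 = 1 then teams ++ ["Bye"] else teams) = t
  rw [hgen] at hev
  cases t with
  | nil => simp [fixturesLoopA]
  | cons a tl =>
    set t := a :: tl with ht
    have hne : t ≠ [] := by simp [ht]
    have hlpos : 1 ≤ t.length := by simp [ht]
    set ln := t.length / 2 with hln
    have hlnpos : 1 ≤ ln := by omega
    have hlen : t.length = 2 * ln := by omega
    set ring := (t.take ln).drop 1 ++ (t.drop ln).reverse with hring
    have hringlen : ring.length = 2*ln - 1 := by
      rw [hring]; simp; omega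
    have htk : ring.take (ln-1) = (t.take ln).drop 1 := by
      rw [hring, List.take_append_of_le_length (by simp; omega)]
      apply List.take_of_length_le
      simp; omega
    have htake : t.take ln = t.headI :: ring.take (ln-1) := by
      rw [htk, ht]
      rw [show ln = (ln-1)+1 from by omega]
      simp [List.take_succ_cons]
    have hdrp : t.drop ln = (ring.drop (ln-1)).reverse := by
      rw [hring, List.drop_append_of_le_length (by simp; omega)]
      rw [show ((t.take ln).drop 1).drop (ln-1) = (t.take ln).drop ln from by
        rw [List.drop_drop]; congr 1; omega]
      simp
    rw [htake, hdrp]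
    have hmain := loopA_inv ln hlnpos t.headI ring hringlen (t.length - 1) 0 (by omega)
    rw [pvRotr_zero] at hmain
    rw [hmain]
    rw [if_neg (by simp [ht])]
    apply List.map_congr_left
    intro i _
    simp only [pvRnd, pvRotr, Nat.zero_add, hringlen]
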